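-- pv_equiv track=rewrite | github.com/mehmetgul/checkmate | agent/mcp_client.py | _get_target_variations
-- ===== SOURCE A (Python) =====
-- def _get_target_variations(target: str) -> list:
--     """
--     Generate variations of the target by removing common element type suffixes.
--
--     Users often describe elements with their type, e.g.:
--     - "submit button" → try "submit"
--     - "credentials link" → try "credentials"
--     - "Password input field" → try "Password input", "Password"
--
--     Recursively strips suffixes to handle multi-word patterns.
--     """
--     variations = [target]
--     current = target
--
--     # Recursively strip suffixes
--     while True:
--         current_lower = current.lower()
--         found_suffix = False
--
--         for suffix in ELEMENT_TYPE_SUFFIXES: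
--             if current_lower.endswith(suffix):
--                 stripped = current[:len(current) - len(suffix)].strip()
--                 if stripped and stripped not in variations:
--                     variations.append(stripped)
--                     current = stripped
--                     found_suffix = True
--                     break
--
--         if not found_suffix:
--             break
--
--     return variations
--
-- ELEMENT_TYPE_SUFFIXES = [
--     " link", " button", " btn", " input", " field", " text",
--     " image", " img", " icon", " checkbox", " radio", " dropdown",
--     " menu", " tab", " option", " label", " heading", " title",
-- ]
-- ===== SOURCE B (Python) =====
-- ELEMENT_TYPE_SUFFIXES = [
--     " link", " button", " btn", " input", " field", " text",
--     " image", " img", " icon", " checkbox", " radio", " dropdown",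
--     " menu", " tab", " option", " label", " heading", " title",
-- ]
--
--
-- def _strip_once(cur):
--     """First non-empty result of stripping a matching type suffix, else None.
--
--     A successful strip always yields a strictly shorter string, so no
--     duplicate can ever arise along the chain and no seen-set is needed."""
--     low = cur.lower()
--     for suffix in ELEMENT_TYPE_SUFFIXES:
--         if low.endswith(suffix):
--             s = cur[:-len(suffix)].strip()
--             if s:
--                 return s
--     return None
--
--
-- def _get_target_variations(target: str) -> list:
--     nxt = _strip_once(target)
--     if nxt is None:
--         return [target]
--     return [target] + _get_target_variations(nxt)
-- ===== Notes on version B (the rewrite author's own statement) =====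
-- stated objective: simpler
-- what changed: B drops A's membership test against the variations list entirely (a successful strip is always strictly shorter, so a duplicate can never arise) and replaces the while-True loop with its variations/current/found_suffix state by a _strip_once helper plus plain cons-recursion on the shrinking string.
import Mathlib
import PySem

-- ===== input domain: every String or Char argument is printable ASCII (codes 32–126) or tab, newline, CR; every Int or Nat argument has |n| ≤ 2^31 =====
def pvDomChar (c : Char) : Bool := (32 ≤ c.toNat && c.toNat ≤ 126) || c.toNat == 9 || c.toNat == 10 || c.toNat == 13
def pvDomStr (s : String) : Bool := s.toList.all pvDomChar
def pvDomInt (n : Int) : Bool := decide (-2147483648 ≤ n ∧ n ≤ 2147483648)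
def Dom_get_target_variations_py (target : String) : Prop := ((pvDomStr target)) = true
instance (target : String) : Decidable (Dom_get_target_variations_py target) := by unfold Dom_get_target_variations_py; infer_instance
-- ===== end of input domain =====

-- B drops A's seen-list membership test (each accepted strip is strictly shorter, so a duplicate
-- can never arise) and builds the chain by plain cons-recursion on the shrinking string instead of
-- A's while-loop with a variations/current/found_suffix state; objective: simpler, same cost.

-- ELEMENT_TYPE_SUFFIXES (module constant, shared by both programs)
def pvSuffixes : List (List Char) :=
  [" link".toList, " button".toList, " btn".toList, " input".toList, " field".toList, " text".toList,
   " image".toList, " img".toList, " icon".toList, " checkbox".toList, " radio".toList, " dropdown".toList,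
   " menu".toList, " tab".toList, " option".toList, " label".toList, " heading".toList, " title".toList]

-- ===== PORT A =====
-- the 'for suffix in ELEMENT_TYPE_SUFFIXES: … break' scan of A, with the found_suffix flag
-- realised as the Option result (some stripped = found_suffix set, loop broken)
def aScan (variations : List (List Char)) (cl current : List Char) :
    List (List Char) → Option (List Char)
  | [] => none
  | suf :: rest =>
    if PySem.Chars.endswith cl suf then
      -- stripped = current[:len(current) - len(suffix)].strip()
      let stripped := PySem.Chars.strip
        (PySem.List.slice current none (some ((current.length : Int) - (suf.length : Int))))
      if stripped ≠ [] ∧ stripped ∉ variations then some stripped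
      else aScan variations cl current rest
    else aScan variations cl current rest

-- the next three lemmas are needed by the ports' termination proofs (cited in decreasing_by)
lemma length_strip_le (s : List Char) : (PySem.Chars.strip s).length ≤ s.length := by
  simp only [PySem.Chars.strip, PySem.Chars.lstrip, PySem.Chars.rstrip, List.length_reverse]
  calc (List.dropWhile PySem.Chars.isspace (List.dropWhile PySem.Chars.isspace s).reverse).length
      ≤ (List.dropWhile PySem.Chars.isspace s).reverse.length := List.length_dropWhile_le _ _
    _ ≤ s.length := by simpa using List.length_dropWhile_le PySem.Chars.isspace s

lemma aScan_some_lt (variations : List (List Char)) (cl current s : List Char)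
    (hcl : cl.length = current.length) :
    ∀ sufs : List (List Char), (∀ suf ∈ sufs, suf ≠ []) →
      aScan variations cl current sufs = some s → s.length < current.length := by
  intro sufs
  induction sufs with
  | nil => intro _ h; simp [aScan] at h
  | cons suf rest ih =>
    intro hne h
    simp only [aScan] at h
    split_ifs at h with hend hguard
    · have hsuf : suf <:+ cl := List.isSuffixOf_iff_suffix.mp hend
      have hle : suf.length ≤ current.length := hcl ▸ hsuf.length_le
      have hpos : 0 < suf.length := List.length_pos_iff.mpr (hne suf (by simp))
      have hb : ((current.length : Int) - (suf.length : Int))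
          = ((current.length - suf.length : Nat) : Int) := by omega
      obtain rfl : _ = s := Option.some.inj h
      have h1 := length_strip_le
        (PySem.List.slice current none (some ((current.length : Int) - (suf.length : Int))))
      have h2 : (PySem.List.slice current none
          (some ((current.length : Int) - (suf.length : Int)))).length
          ≤ current.length - suf.length := by
        rw [hb, PySem.List.slice_to_natCast]
        simp [List.length_take]
      omega
    · exact ih (fun x hx => hne x (by simp [hx])) h
    · exact ih (fun x hx => hne x (by simp [hx])) h

lemma pvSuffixes_ne : ∀ suf ∈ pvSuffixes, suf ≠ [] := by decide

-- the while True loop of A: variations/current are the loop state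
def aLoop (variations : List (List Char)) (current : List Char) : List (List Char) :=
  match h : aScan variations (PySem.Chars.lower current) current pvSuffixes with
  | none => variations
  | some stripped => aLoop (variations ++ [stripped]) stripped
termination_by current.length
decreasing_by
  exact aScan_some_lt _ _ _ _ (by simp [PySem.Chars.lower]) pvSuffixes pvSuffixes_ne h

def get_target_variations_py (target : String) : List String :=
  (aLoop [target.toList] target.toList).map String.ofList

-- ===== PORT B =====
-- _strip_once's loop body for one suffix: the stripped candidate if it is acceptable
def bCand (cur suffix : List Char) : Option (List Char) :=
  if PySem.Chars.endswith (PySem.Chars.lower cur) suffix then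
    if (PySem.Chars.strip (PySem.List.slice cur none (some (-(suffix.length : Int))))).isEmpty then
      none
    else some (PySem.Chars.strip (PySem.List.slice cur none (some (-(suffix.length : Int)))))
  else none

-- _strip_once: first non-empty stripped form under a matching suffix (no seen-set)
def bStep? (cur : List Char) : Option (List Char) :=
  pvSuffixes.findSome? (bCand cur)

-- needed by the port's termination proof (cited in decreasing_by)
lemma bCand_some_lt (cur suf s : List Char) (hne : suf ≠ [])
    (hf : bCand cur suf = some s) : s.length < cur.length := by
  unfold bCand at hf
  split_ifs at hf with hend hemp
  obtain rfl : _ = s := Option.some.inj hf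
  have hsuf : suf <:+ PySem.Chars.lower cur := List.isSuffixOf_iff_suffix.mp hend
  have hle : suf.length ≤ cur.length := by
    have := hsuf.length_le; simpa [PySem.Chars.lower] using this
  have hpos : 0 < suf.length := List.length_pos_iff.mpr hne
  have h1 := length_strip_le (PySem.List.slice cur none (some (-(suf.length : Int))))
  have h2 : (PySem.List.slice cur none (some (-(suf.length : Int)))).length
      ≤ cur.length - suf.length := by
    rw [PySem.List.slice_to_neg_natCast _ _ hpos]
    simp [List.length_take]
  omega

lemma bStep?_some_lt (cur s : List Char) (h : bStep? cur = some s) : s.length < cur.length := by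
  unfold bStep? at h
  have : ∀ sufs : List (List Char), (∀ suf ∈ sufs, suf ≠ []) →
      sufs.findSome? (bCand cur) = some s → s.length < cur.length := by
    intro sufs
    induction sufs with
    | nil => intro _ h; simp at h
    | cons suf rest ih =>
      intro hne h
      rw [List.findSome?_cons] at h
      cases hf : bCand cur suf with
      | none => rw [hf] at h; exact ih (fun x hx => hne x (by simp [hx])) h
      | some b =>
        rw [hf] at h
        exact (Option.some.inj h) ▸ bCand_some_lt cur suf b (hne suf (by simp)) hf
  exact this pvSuffixes pvSuffixes_ne h

-- _get_target_variations of B: cons-recursion on the shrinking string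
def bChain (cur : List Char) : List (List Char) :=
  match h : bStep? cur with
  | none => [cur]
  | some nxt => cur :: bChain nxt
termination_by cur.length
decreasing_by exact bStep?_some_lt _ _ h

def get_target_variations_py_alt (target : String) : List String :=
  (bChain target.toList).map String.ofList

-- ===== PRECONDITION & SPEC =====
def Spec_get_target_variations_py (target : String) (out : List String) : Prop := out = get_target_variations_py_alt target
instance (target : String) (out : List String) : Decidable (Spec_get_target_variations_py target out) := by unfold Spec_get_target_variations_py; infer_instance

-- ===== CLAIM (what is proved, stated in full; the proofs are below) =====
def Claim_equal_get_target_variations_py : Prop := ∀ (target : String), Dom_get_target_variations_py target → Spec_get_target_variations_py target (get_target_variations_py target)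

-- ===== LEMMAS AND PROOFS =====

-- aScan unfolded on a cons (definitional)
lemma aScan_cons (v : List (List Char)) (cl c suf : List Char) (rest : List (List Char)) :
    aScan v cl c (suf :: rest) =
      if PySem.Chars.endswith cl suf then
        (if PySem.Chars.strip (PySem.List.slice c none
              (some ((c.length : Int) - (suf.length : Int)))) ≠ [] ∧
            PySem.Chars.strip (PySem.List.slice c none
              (some ((c.length : Int) - (suf.length : Int)))) ∉ v then
          some (PySem.Chars.strip (PySem.List.slice c none
            (some ((c.length : Int) - (suf.length : Int)))))
        else aScan v cl c rest)
      else aScan v cl c rest := rfl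

-- under the length invariant (everything seen is at least as long as current), A's scan and B's
-- _strip_once agree: the 'not in variations' conjunct of A's guard is always true
lemma scan_eq_step (v : List (List Char)) (c : List Char)
    (hv : ∀ x ∈ v, c.length ≤ x.length) :
    aScan v (PySem.Chars.lower c) c pvSuffixes = bStep? c := by
  unfold bStep?
  have : ∀ sufs : List (List Char), (∀ suf ∈ sufs, suf ≠ []) →
      aScan v (PySem.Chars.lower c) c sufs = sufs.findSome? (bCand c) := by
    intro sufs
    induction sufs with
    | nil => intro _; simp [aScan]
    | cons suf rest ih =>
      intro hne
      rw [List.findSome?_cons, aScan_cons]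
      by_cases hend : PySem.Chars.endswith (PySem.Chars.lower c) suf = true
      · -- suffix matches: the two stripped values are the same list
        have hsuf : suf <:+ PySem.Chars.lower c := List.isSuffixOf_iff_suffix.mp hend
        have hle : suf.length ≤ c.length := by
          have := hsuf.length_le; simpa [PySem.Chars.lower] using this
        have hpos : 0 < suf.length := List.length_pos_iff.mpr (hne suf (by simp))
        have hb : ((c.length : Int) - (suf.length : Int))
            = ((c.length - suf.length : Nat) : Int) := by omega
        have hslice : PySem.List.slice c none (some ((c.length : Int) - (suf.length : Int)))
            = PySem.List.slice c none (some (-(suf.length : Int))) := by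
          rw [hb, PySem.List.slice_to_natCast, PySem.List.slice_to_neg_natCast _ _ hpos]
        rw [if_pos hend, hslice]
        set s := PySem.Chars.strip (PySem.List.slice c none (some (-(suf.length : Int)))) with hs
        have hcand : bCand c suf = if s.isEmpty then none else some s := by
          unfold bCand
          rw [if_pos hend, ← hs]
        by_cases hnil : s = []
        · rw [if_neg (by simp [hnil]), hcand, if_pos (by simp [hnil])]
          exact ih (fun x hx => hne x (by simp [hx]))
        · have hlen : s.length < c.length :=
            bCand_some_lt c suf s (hne suf (by simp))
              (by rw [hcand, if_neg (by simpa using hnil)])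
          have hnotin : s ∉ v := fun hmem => absurd (hv s hmem) (by omega)
          rw [if_pos ⟨hnil, hnotin⟩, hcand, if_neg (by simpa using hnil)]
      · rw [if_neg hend, show bCand c suf = none from by unfold bCand; rw [if_neg hend]]
        exact ih (fun x hx => hne x (by simp [hx]))
  exact this pvSuffixes pvSuffixes_ne

lemma bChain_head_tail (c : List Char) : bChain c = c :: (bChain c).tail := by
  rw [bChain]; split <;> simp

lemma aLoop_none (v : List (List Char)) (c : List Char)
    (h : aScan v (PySem.Chars.lower c) c pvSuffixes = none) : aLoop v c = v := by
  rw [aLoop]; split <;> simp_all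

lemma aLoop_some (v : List (List Char)) (c s : List Char)
    (h : aScan v (PySem.Chars.lower c) c pvSuffixes = some s) :
    aLoop v c = aLoop (v ++ [s]) s := by
  rw [aLoop]; split <;> simp_all

lemma bChain_none (c : List Char) (h : bStep? c = none) : bChain c = [c] := by
  rw [bChain]; split <;> simp_all

lemma bChain_some (c s : List Char) (h : bStep? c = some s) : bChain c = c :: bChain s := by
  rw [bChain]; split <;> simp_all

-- A's loop produces the seen prefix followed by the rest of B's chain
lemma loop_eq_chain (n : Nat) : ∀ (c : List Char) (v : List (List Char)),
    c.length ≤ n → (∀ x ∈ v, c.length ≤ x.length) →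
    aLoop v c = v ++ (bChain c).tail := by
  induction n with
  | zero =>
    intro c v h hv
    cases hstep : bStep? c with
    | none =>
      rw [aLoop_none v c (by rw [scan_eq_step v c hv, hstep]), bChain_none c hstep]
      simp
    | some s => exact absurd (bStep?_some_lt c s hstep) (by omega)
  | succ n ih =>
    intro c v h hv
    cases hstep : bStep? c with
    | none =>
      rw [aLoop_none v c (by rw [scan_eq_step v c hv, hstep]), bChain_none c hstep]
      simp
    | some s =>
      have hlt := bStep?_some_lt c s hstep
      rw [aLoop_some v c s (by rw [scan_eq_step v c hv, hstep]),
        ih s (v ++ [s]) (by omega)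
          (by intro x hx; rcases List.mem_append.mp hx with hx | hx
              · exact le_trans (le_of_lt hlt) (hv x hx)
              · simp_all),
        bChain_some c s hstep, bChain_head_tail s]
      simp

-- ===== VERDICT (by name: the statement is the Claim_ definition above) =====
theorem get_target_variations_py_spec : Claim_equal_get_target_variations_py := by
  intro target _
  unfold Spec_get_target_variations_py get_target_variations_py get_target_variations_py_alt
  rw [loop_eq_chain target.toList.length target.toList [target.toList] le_rfl (by simp)]
  rw [bChain_head_tail]
  simp
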